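-- pv_equiv track=rewrite | github.com/prakharg24/nest | agents/dataloader.py | local_intent_dict
-- ===== SOURCE A (Python) =====
-- import copy
--
-- label_intent = ['elicit-pref', 'no-need', 'uv-part', 'other-need', 'showing-empathy', 'vouch-fair', 'small-talk', 'self-need', 'promote-coordination', 'non-strategic']
--
-- intent_revdict = {ele: i for i, ele in enumerate(label_intent)}
--
-- def local_intent_dict(intent_array):
--     outdict = {}
--     empty_array = [0 for _ in range(len(label_intent))]
--     for ele in intent_array:
--         temp_arr = copy.deepcopy(empty_array)
--         labels = ele[1].split(",")
--         for label in labels: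
--             temp_arr[intent_revdict[label]] = 1
--         outdict[ele[0]] = temp_arr
--
--     return outdict
-- ===== SOURCE B (Python) =====
-- label_intent = ['elicit-pref', 'no-need', 'uv-part', 'other-need', 'showing-empathy', 'vouch-fair', 'small-talk', 'self-need', 'promote-coordination', 'non-strategic']
--
-- # precomputed one-hot basis vector for every intent label
-- _basis = {lab: [1 if j == i else 0 for j in range(len(label_intent))]
--           for i, lab in enumerate(label_intent)}
--
-- def local_intent_dict(intent_array):
--     outdict = {}
--     zero = [0] * len(label_intent)
--     for key, labs in intent_array:
--         vec = zero
--         for lab in labs.split(","):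
--             vec = [max(a, b) for a, b in zip(vec, _basis[lab])]
--         outdict[key] = vec
--     return outdict
-- ===== Notes on version B (the rewrite author's own statement) =====
-- stated objective: alternative
-- what changed: Drops the reverse index and the deepcopy-then-scatter-by-index loop entirely: B precomputes a table of one-hot basis vectors per label and combines the labels' basis vectors by an elementwise-max fold starting from the zero vector, so the output vector is never indexed or mutated.
import Mathlib
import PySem

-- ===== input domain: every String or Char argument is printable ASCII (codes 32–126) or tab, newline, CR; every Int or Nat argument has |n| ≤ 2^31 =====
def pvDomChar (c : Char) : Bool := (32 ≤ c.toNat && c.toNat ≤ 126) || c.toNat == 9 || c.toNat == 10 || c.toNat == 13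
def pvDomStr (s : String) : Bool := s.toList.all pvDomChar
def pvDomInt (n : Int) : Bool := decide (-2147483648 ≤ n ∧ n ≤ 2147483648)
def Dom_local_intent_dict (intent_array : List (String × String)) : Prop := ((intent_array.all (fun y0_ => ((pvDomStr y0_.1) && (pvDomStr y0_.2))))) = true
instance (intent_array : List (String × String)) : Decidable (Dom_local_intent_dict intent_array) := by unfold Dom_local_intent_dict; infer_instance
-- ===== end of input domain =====

-- B drops the reverse index and the copy-then-scatter loop: it precomputes one one-hot basis
-- vector per label and combines labels by an elementwise-max fold (objective: alternative).

-- module-level constant shared by both Pythons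
def labelIntent : List String :=
  ["elicit-pref", "no-need", "uv-part", "other-need", "showing-empathy", "vouch-fair",
   "small-talk", "self-need", "promote-coordination", "non-strategic"]

-- A's module-level reverse dict
def intentRevdict : PySem.Dict String Int :=
  (PySem.List.enumerate labelIntent 0).foldl (fun d p => d.insert p.2 p.1) PySem.Dict.empty

-- B's module-level basis table: label -> its one-hot vector
def basisDict : PySem.Dict String (List Int) :=
  (PySem.List.enumerate labelIntent 0).foldl
    (fun d p => d.insert p.2
      ((PySem.List.pyRange 0 (labelIntent.length : Int) 1).map
        (fun j => if j == p.1 then (1 : Int) else 0)))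
    PySem.Dict.empty

-- s.split(","): the separator is the nonempty literal ",", so split? always returns some
def splitComma (s : String) : List String := (PySem.Str.split? s ",").getD []

-- ===== PORT A =====
def local_intent_dict (intent_array : List (String × String)) : List (String × List Int) :=
  let empty_array : List Int := (PySem.List.pyRange 0 (labelIntent.length : Int) 1).map (fun _ => (0 : Int))
  (intent_array.foldl
    (fun (outdict : PySem.Dict String (List Int)) ele =>
      let temp_arr := empty_array
      let labels := splitComma ele.2
      let temp_arr := labels.foldl
        (fun arr label => PySem.List.pySetD arr (intentRevdict.getD label 0) 1) temp_arr
      outdict.insert ele.1 temp_arr)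
    PySem.Dict.empty).items

-- ===== PORT B =====
def local_intent_dict_alt (intent_array : List (String × String)) : List (String × List Int) :=
  let zero : List Int := PySem.List.pyRepeat [(0 : Int)] (labelIntent.length : Int)
  (intent_array.foldl
    (fun (outdict : PySem.Dict String (List Int)) ele =>
      let vec := (splitComma ele.2).foldl
        (fun vec lab => (vec.zip (basisDict.getD lab [])).map (fun p => max p.1 p.2)) zero
      outdict.insert ele.1 vec)
    PySem.Dict.empty).items

-- ===== PRECONDITION & SPEC =====
-- Pre_ excludes inputs where some comma-separated label is not in label_intent: there both
-- Pythons raise KeyError.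
def Pre_local_intent_dict (intent_array : List (String × String)) : Prop :=
  ∀ ele ∈ intent_array, ∀ label ∈ splitComma ele.2, label ∈ labelIntent
instance (intent_array : List (String × String)) : Decidable (Pre_local_intent_dict intent_array) := by unfold Pre_local_intent_dict; infer_instance

def pvWitness_local_intent_dict : (List (String × String)) :=
  [("a", "no-need,uv-part"), ("b", "elicit-pref")]

def Spec_local_intent_dict (intent_array : List (String × String)) (out : List (String × List Int)) : Prop := out = local_intent_dict_alt intent_array
instance (intent_array : List (String × String)) (out : List (String × List Int)) : Decidable (Spec_local_intent_dict intent_array out) := by unfold Spec_local_intent_dict; infer_instance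

-- ===== CLAIM (what is proved, stated in full; the proofs are below) =====
def Claim_equal_local_intent_dict : Prop := ∀ (intent_array : List (String × String)), Dom_local_intent_dict intent_array → Pre_local_intent_dict intent_array → Spec_local_intent_dict intent_array (local_intent_dict intent_array)

-- ===== LEMMAS AND PROOFS =====

-- any valid label looks up to an index in [0, 10)
lemma revdict_bounds (label : String) (h : label ∈ labelIntent) :
    0 ≤ intentRevdict.getD label 0 ∧ intentRevdict.getD label 0 < (labelIntent.length : Int) := by
  fin_cases h <;> decide

-- A side: scattering 1s into v at indices ids preserves the length
lemma scatter_length (ids : List Int) (v : List Int) :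
    (ids.foldl (fun arr i => PySem.List.pySetD arr i (1 : Int)) v).length = v.length := by
  induction ids generalizing v with
  | nil => rfl
  | cons i rest ih => simp [List.foldl_cons, ih, PySem.List.length_pySetD]

-- A side: the scattered vector, position by position
lemma scatter_getD (ids : List Int) (v : List Int)
    (h : ∀ i ∈ ids, 0 ≤ i ∧ i < (v.length : Int)) (j : Nat) :
    (ids.foldl (fun arr i => PySem.List.pySetD arr i (1 : Int)) v).getD j 0
    = if (j : Int) ∈ ids ∧ j < v.length then 1 else v.getD j 0 := by
  induction ids generalizing v with
  | nil => simp
  | cons i rest ih =>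
    obtain ⟨hi0, hilt⟩ := h i (List.mem_cons_self ..)
    have hset : PySem.List.pySetD v i (1 : Int) = v.set i.toNat 1 :=
      PySem.List.pySetD_of_nonneg v 1 hi0
    have hlen : (PySem.List.pySetD v i (1 : Int)).length = v.length := by
      rw [hset]; simp
    have hrest : ∀ x ∈ rest, 0 ≤ x ∧ x < ((PySem.List.pySetD v i (1 : Int)).length : Int) := by
      intro x hx; rw [hlen]; exact h x (List.mem_cons_of_mem _ hx)
    rw [List.foldl_cons, ih _ hrest]
    rw [hlen, hset]
    by_cases hjlt : j < v.length
    · by_cases hmem : (j : Int) ∈ rest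
      · simp [hmem, hjlt]
      · by_cases hij : (j : Int) = i
        · have hti : i.toNat = j := by omega
          simp [hjlt, hij, hti, List.getElem_set_self]
        · have hti : i.toNat ≠ j := by omega
          simp [hmem, hjlt, hij, hti]
    · have hge : v.length ≤ j := Nat.le_of_not_lt hjlt
      have hout : (v.set i.toNat 1).getD j 0 = v.getD j 0 := by
        rw [List.getD_eq_default _ 0 (by simpa using hge), List.getD_eq_default _ 0 hge]
      simp only [hjlt, and_false, if_false]
      rw [hout]

-- B side: a valid label's basis vector has full length
lemma basis_length (lab : String) (h : lab ∈ labelIntent) :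
    (basisDict.getD lab []).length = labelIntent.length := by
  fin_cases h <;> decide

-- B side: the basis vector is the indicator of the label's index (bounded statement, by decide)
lemma basis_getD : ∀ lab ∈ labelIntent, ∀ j ∈ List.range labelIntent.length,
    (basisDict.getD lab []).getD j 0
    = (if intentRevdict.getD lab 0 = (j : Int) then (1 : Int) else 0) := by decide

-- B side: the elementwise-max fold of basis vectors, position by position
lemma maxfold (labels : List String) (hl : ∀ lab ∈ labels, lab ∈ labelIntent)
    (acc : List Int) (hacc : acc.length = labelIntent.length) :
    (labels.foldl (fun v lab => (v.zip (basisDict.getD lab [])).map (fun p => max p.1 p.2)) acc).length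
      = labelIntent.length
    ∧ ∀ j < labelIntent.length,
      (labels.foldl (fun v lab => (v.zip (basisDict.getD lab [])).map (fun p => max p.1 p.2)) acc).getD j 0
      = labels.foldl (fun a lab => max a ((basisDict.getD lab []).getD j 0)) (acc.getD j 0) := by
  induction labels generalizing acc with
  | nil => exact ⟨hacc, fun j _ => rfl⟩
  | cons lab rest ih =>
    have hb := basis_length lab (hl lab (List.mem_cons_self ..))
    have hstep : ((acc.zip (basisDict.getD lab [])).map (fun p => max p.1 p.2)).length
        = labelIntent.length := by
      simp [List.length_zip, hacc, hb]
    obtain ⟨ihlen, ihget⟩ := ih (fun l hm => hl l (List.mem_cons_of_mem _ hm)) _ hstep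
    refine ⟨ihlen, fun j hj => ?_⟩
    rw [List.foldl_cons, List.foldl_cons, ihget j hj]
    congr 1
    have hjlt : j < ((acc.zip (basisDict.getD lab []))).length := by
      simp [List.length_zip, hacc, hb]; omega
    rw [List.getD_eq_getElem _ 0 (by simpa using hjlt)]
    rw [List.getD_eq_getElem _ 0 (by omega : j < acc.length),
        List.getD_eq_getElem _ 0 (by omega : j < (basisDict.getD lab []).length)]
    simp [List.getElem_zip]

-- B side: the scalar max fold over labels is the indicator of index membership
lemma scalarfold (labels : List String) (hl : ∀ lab ∈ labels, lab ∈ labelIntent)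
    (j : Nat) (hj : j < labelIntent.length) (c : Int) (hc : c = 0 ∨ c = 1) :
    labels.foldl (fun a lab => max a ((basisDict.getD lab []).getD j 0)) c
    = if c = 1 ∨ (j : Int) ∈ labels.map (fun l => intentRevdict.getD l 0) then 1 else 0 := by
  induction labels generalizing c with
  | nil =>
    rcases hc with rfl | rfl <;> simp
  | cons lab rest ih =>
    have hlab := hl lab (List.mem_cons_self ..)
    have hbd := basis_getD lab hlab j (List.mem_range.mpr hj)
    rw [List.foldl_cons, hbd]
    by_cases hit : intentRevdict.getD lab 0 = (j : Int)
    · have h1 : max c (if intentRevdict.getD lab 0 = (j : Int) then (1 : Int) else 0) = 1 := by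
        rcases hc with rfl | rfl <;> simp [hit]
      rw [h1, ih (fun l hm => hl l (List.mem_cons_of_mem _ hm)) 1 (Or.inr rfl)]
      simp [hit]
    · have h0 : max c (if intentRevdict.getD lab 0 = (j : Int) then (1 : Int) else 0) = c := by
        rcases hc with rfl | rfl <;> simp [hit]
      rw [h0, ih (fun l hm => hl l (List.mem_cons_of_mem _ hm)) c hc]
      have hne : ¬ (j : Int) = intentRevdict.getD lab 0 := fun h => hit h.symm
      simp [hne]


-- per-element: A's scattered vector equals B's max-combined basis vectors
lemma vec_eq (s : String)
    (h : ∀ label ∈ splitComma s, label ∈ labelIntent) :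
    (splitComma s).foldl
        (fun arr label => PySem.List.pySetD arr (intentRevdict.getD label 0) 1)
        ((PySem.List.pyRange 0 (labelIntent.length : Int) 1).map (fun _ => (0 : Int)))
    = (splitComma s).foldl
        (fun vec lab => (vec.zip (basisDict.getD lab [])).map (fun p => max p.1 p.2))
        (PySem.List.pyRepeat [(0 : Int)] (labelIntent.length : Int)) := by
  set ids := (splitComma s).map (fun label => intentRevdict.getD label 0) with hids
  set v0 : List Int := (PySem.List.pyRange 0 (labelIntent.length : Int) 1).map (fun _ => (0 : Int)) with hv0
  have hv0len : v0.length = labelIntent.length := by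
    simp [hv0, PySem.List.length_pyRange_one]
  have hv0get : ∀ j : Nat, v0.getD j 0 = 0 := by
    intro j
    rcases Nat.lt_or_ge j v0.length with hlt | hge
    · rw [List.getD_eq_getElem _ 0 hlt]; simp [hv0]
    · exact List.getD_eq_default _ 0 hge
  have hz : PySem.List.pyRepeat [(0 : Int)] (labelIntent.length : Int)
      = List.replicate labelIntent.length (0 : Int) := by decide
  have hzlen : (PySem.List.pyRepeat [(0 : Int)] (labelIntent.length : Int)).length
      = labelIntent.length := by rw [hz]; simp
  have hfoldA : (splitComma s).foldl
      (fun arr label => PySem.List.pySetD arr (intentRevdict.getD label 0) 1) v0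
      = ids.foldl (fun arr i => PySem.List.pySetD arr i (1 : Int)) v0 := by
    rw [hids, List.foldl_map]
  obtain ⟨hBlen, hBget⟩ := maxfold (splitComma s) h _ hzlen
  have hbnd : ∀ i ∈ ids, 0 ≤ i ∧ i < (v0.length : Int) := by
    intro i hi
    obtain ⟨label, hl, rfl⟩ := List.mem_map.mp hi
    rw [hv0len]
    exact revdict_bounds label (h label hl)
  apply List.ext_getElem
  · rw [hfoldA, scatter_length, hv0len, hBlen]
  · intro j h1 h2
    have hjlt : j < labelIntent.length := by
      rw [hfoldA, scatter_length, hv0len] at h1; exact h1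
    rw [← List.getD_eq_getElem _ 0 h1, ← List.getD_eq_getElem _ 0 h2]
    rw [hfoldA, scatter_getD ids v0 hbnd j, hBget j hjlt]
    rw [scalarfold (splitComma s) h j hjlt _ (Or.inl (by
      have : (PySem.List.pyRepeat [(0 : Int)] (labelIntent.length : Int)).getD j 0 = 0 := by
        rw [hz]
        rcases Nat.lt_or_ge j (List.replicate labelIntent.length (0 : Int)).length with hlt | hge
        · rw [List.getD_eq_getElem _ 0 hlt]; simp
        · exact List.getD_eq_default _ 0 hge
      exact this))]
    rw [hv0get j, hv0len]
    by_cases hm : (j : Int) ∈ ids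
    · simp [hjlt, hids]
    · have hm' : ¬ (j : Int) ∈ (splitComma s).map (fun l => intentRevdict.getD l 0) := by
        rw [← hids]; exact hm
      simp [hm, hm']

-- ===== VERDICT (by name: the statement is the Claim_ definition above) =====
theorem local_intent_dict_spec : Claim_equal_local_intent_dict := by
  intro intent_array _ hpre
  unfold Spec_local_intent_dict local_intent_dict local_intent_dict_alt
  show ((List.foldl _ PySem.Dict.empty intent_array).items : List (String × List Int)) = (List.foldl _ PySem.Dict.empty intent_array).items
  congr 1
  apply PySem.List.foldl_congr_mem
  intro acc ele hmem
  exact congrArg (acc.insert ele.1) (vec_eq ele.2 (hpre ele hmem))
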